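-- pv_equiv track=rewrite | github.com/wjdheesp44/codetree-TILs | 241012/고대 문명 유적 탐사/ancient-ruin-exploration.py | count_clear
-- ===== SOURCE A (Python) =====
-- from collections import deque
--
-- def bfs(arr, visited, si, sj, clr):
--     q = deque()
--     q.append((si, sj))
--     visited[si][sj] = 1
--     sset = set()
--     sset.add((si, sj))
--     cnt = 0
--     cnt += 1
--
--     dx = [-1, 0, 1, 0]
--     dy = [0, 1, 0, -1]
--
--     while q:
--         ci, cj = q.popleft()
--         for i in range(4):
--             ni, nj = ci + dx[i], cj + dy[i]
--             if 0 <= ni < 5 and 0 <= nj < 5 and not visited[ni][nj] and arr[ci][cj] == arr[ni][nj]: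
--                 q.append((ni, nj))
--                 visited[ni][nj] = 1
--                 cnt += 1
--                 sset.add((ni, nj))
--
--     if cnt >= 3: # 유물이 3개 이상이면
--         if clr == 1:     # 지워야 하면
--             for i, j in sset:
--                 arr[i][j] = 0
--
--         return cnt
--     else:
--         return 0
--
-- def count_clear(arr, clr):
--     visited = [[0]*5 for _ in range(5)]
--     cnt = 0
--     for i in range(5):
--         for j in range(5):
--             if not visited[i][j]:
--                 t = bfs(arr, visited, i, j, clr)
--                 cnt += t
--     return cnt
-- ===== SOURCE B (Python) =====
-- def count_clear(arr, clr):
--     # Per-cell fixed-point saturation instead of shared-visited BFS flood fill.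
--     # Mutates arr the same way A does (zeroes cells of components of size >= 3 when clr == 1).
--     def comp(si, sj):
--         cells = {(si, sj)}
--         for _ in range(25):
--             cells = cells | {(i + di, j + dj)
--                              for (i, j) in cells
--                              for (di, dj) in ((-1, 0), (0, 1), (1, 0), (0, -1))
--                              if 0 <= i + di < 5 and 0 <= j + dj < 5
--                              and arr[i + di][j + dj] == arr[i][j]}
--         return cells
--     big = [(i, j) for i in range(5) for j in range(5) if len(comp(i, j)) >= 3]
--     if clr == 1:
--         for i, j in big:
--             arr[i][j] = 0
--     return len(big)
-- ===== Notes on version B (the rewrite author's own statement) =====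
-- stated objective: alternative
-- what changed: Replaces the shared-visited BFS flood fill (queue + visited grid, summing component sizes) with an independent per-cell fixed-point saturation of each cell's component, counting the cells whose component has size >= 3.
import Mathlib
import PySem

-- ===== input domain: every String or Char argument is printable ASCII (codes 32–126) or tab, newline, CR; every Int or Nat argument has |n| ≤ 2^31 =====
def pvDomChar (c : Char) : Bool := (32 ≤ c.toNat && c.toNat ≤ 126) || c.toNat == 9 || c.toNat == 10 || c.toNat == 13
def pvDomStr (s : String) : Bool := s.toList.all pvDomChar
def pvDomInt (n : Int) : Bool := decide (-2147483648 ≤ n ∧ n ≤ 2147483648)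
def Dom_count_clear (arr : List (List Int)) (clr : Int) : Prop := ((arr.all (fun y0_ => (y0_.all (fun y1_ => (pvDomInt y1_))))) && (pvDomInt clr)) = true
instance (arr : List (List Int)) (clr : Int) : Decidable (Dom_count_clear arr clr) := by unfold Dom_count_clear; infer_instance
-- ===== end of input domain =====

-- B replaces A's shared-visited BFS flood fill with an independent per-cell fixed-point
-- saturation of components; equivalence is about the RETURN value (both Pythons also
-- mutate arr identically, zeroing cells of components of size ≥ 3 when clr == 1).

-- Shared input decoding / board constants (not algorithm logic):
-- grids are modelled as total functions (Int × Int) → Int; exact under Pre_, since both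
-- programs only index arr at row/column indices 0..4, which Pre_ guarantees in range.
def pvGrid (arr : List (List Int)) : Int × Int → Int :=
  fun p => PySem.List.pyGetD (PySem.List.pyGetD arr p.1 []) p.2 0

def pvInb (p : Int × Int) : Bool := decide (0 ≤ p.1 ∧ p.1 < 5 ∧ 0 ≤ p.2 ∧ p.2 < 5)

-- the zipped (dx, dy) pairs of A (same tuples as B's literal), in order i = 0..3
def pvDirs : List (Int × Int) := [(-1, 0), (0, 1), (1, 0), (0, -1)]

-- the scan order 'for i in range(5): for j in range(5)'
def pvCells : List (Int × Int) :=
  ([0, 1, 2, 3, 4] : List Int).flatMap (fun i => ([0, 1, 2, 3, 4] : List Int).map (fun j => (i, j)))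

-- ===== PORT A =====
-- BFS state: queue, visited grid (0/1 ints, as a function), the set 'sset', the counter.
structure PvBfsSt where
  q : List (Int × Int)
  vis : Int × Int → Int
  sset : Finset (Int × Int)
  cnt : Int

def pvUpd (f : Int × Int → Int) (p : Int × Int) (v : Int) : Int × Int → Int :=
  fun q => if q = p then v else f q

-- one direction i of the 'for i in range(4)' body
def pvStepDir (g : Int × Int → Int) (c : Int × Int) (st : PvBfsSt) (d : Int × Int) : PvBfsSt :=
  let n := (c.1 + d.1, c.2 + d.2)
  if pvInb n = true ∧ st.vis n = 0 ∧ g c = g n then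
    { q := st.q ++ [n], vis := pvUpd st.vis n 1, sset := insert n st.sset, cnt := st.cnt + 1 }
  else st

-- the 'while q:' loop; fuel 50 is a totality guard only (the loop pops ≤ 25 cells,
-- measure |q| + 2·(25 − |sset|) ≤ 49 strictly decreases; proved below)
def pvBfsLoop (g : Int × Int → Int) : Nat → PvBfsSt → PvBfsSt
  | 0, st => st
  | fuel + 1, st =>
    match st.q with
    | [] => st
    | c :: rest => pvBfsLoop g fuel (pvDirs.foldl (pvStepDir g c) { st with q := rest })

-- bfs(arr, visited, si, sj, clr): returns (new grid, new visited, returned count);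
-- the 'for i, j in sset: arr[i][j] = 0' mutation is the pointwise override by 0 on sset.
def pvBfs (g : Int × Int → Int) (vis : Int × Int → Int) (s : Int × Int) (clr : Int) :
    (Int × Int → Int) × (Int × Int → Int) × Int :=
  let st := pvBfsLoop g 50 { q := [s], vis := pvUpd vis s 1, sset := {s}, cnt := 1 }
  if 3 ≤ st.cnt then
    (if clr = 1 then (fun p => if p ∈ st.sset then 0 else g p) else g, st.vis, st.cnt)
  else (g, st.vis, 0)

-- body of the double scan in count_clear; acc = (arr, visited, cnt)
def pvOuterStep (clr : Int) (acc : (Int × Int → Int) × (Int × Int → Int) × Int) (c : Int × Int) :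
    (Int × Int → Int) × (Int × Int → Int) × Int :=
  if acc.2.1 c = 0 then
    let r := pvBfs acc.1 acc.2.1 c clr
    (r.1, r.2.1, acc.2.2 + r.2.2)
  else acc

def count_clear (arr : List (List Int)) (clr : Int) : Int :=
  (pvCells.foldl (pvOuterStep clr) (pvGrid arr, fun _ => (0 : Int), (0 : Int))).2.2

-- ===== PORT B =====
-- Source B's set comprehension: all in-bounds equal-valued neighbours of the cells of S
def pvStepB (g : Int × Int → Int) (S : Finset (Int × Int)) : Finset (Int × Int) :=
  S ∪ S.biUnion (fun p =>
    ((pvDirs.map (fun d => (p.1 + d.1, p.2 + d.2))).filter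
      (fun n => pvInb n && (g n == g p))).toFinset)

-- comp(si, sj): saturate for 25 rounds (Python sets are finite sets; only size is used)
def pvComp (g : Int × Int → Int) (s : Int × Int) : Finset (Int × Int) :=
  (List.range 25).foldl (fun S _ => pvStepB g S) {s}

-- return value is len(big); the clr-mutation in Source B only touches the argument, not the return
def count_clear_alt (arr : List (List Int)) (clr : Int) : Int :=
  ((pvCells.filter (fun c => decide (3 ≤ (pvComp (pvGrid arr) c).card))).length : Int)

-- ===== PRECONDITION & SPEC =====
-- Pre_ = exactly the inputs where Python A returns: ≥ 5 rows whose first five rows have ≥ 5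
-- entries (otherwise arr[i][j] with 0 ≤ i,j < 5 raises IndexError in both programs).
def Pre_count_clear (arr : List (List Int)) (clr : Int) : Prop :=
  5 ≤ arr.length ∧ ∀ r ∈ arr.take 5, 5 ≤ r.length
instance (arr : List (List Int)) (clr : Int) : Decidable (Pre_count_clear arr clr) := by
  unfold Pre_count_clear; infer_instance

def pvWitness_count_clear : List (List Int) × Int :=
  ([[0, 0, 0, 0, 0], [0, 1, 1, 0, 0], [0, 1, 2, 2, 0], [0, 0, 2, 0, 0], [0, 0, 0, 0, 0]], 1)

def Spec_count_clear (arr : List (List Int)) (clr : Int) (out : Int) : Prop := out = count_clear_alt arr clr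
instance (arr : List (List Int)) (clr : Int) (out : Int) : Decidable (Spec_count_clear arr clr out) := by unfold Spec_count_clear; infer_instance

-- ===== CLAIM (what is proved, stated in full; the proofs are below) =====
def Claim_equal_count_clear : Prop := ∀ (arr : List (List Int)) (clr : Int), Dom_count_clear arr clr → Pre_count_clear arr clr → Spec_count_clear arr clr (count_clear arr clr)

-- ===== LEMMAS AND PROOFS =====

-- the 25 board cells as a finite set
def cellsF : Finset (Int × Int) := pvCells.toFinset

-- same-value adjacency of grid g on the board
def adjB (g : Int × Int → Int) (p q : Int × Int) : Bool :=
  pvDirs.any (fun d => decide (q = (p.1 + d.1, p.2 + d.2))) && pvInb p && pvInb q && (g p == g q)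

-- adjacency restricted to cells unvisited in V (what one bfs call may absorb)
def rV (g : Int × Int → Int) (V : Int × Int → Int) (p q : Int × Int) : Bool :=
  adjB g p q && decide (V q = 0)

-- one saturation round for an abstract Bool relation, and the 25-round closure
def rcl (r : Int × Int → Int × Int → Bool) (S : Finset (Int × Int)) : Finset (Int × Int) :=
  S ∪ cellsF.filter (fun q => ∃ p ∈ S, r p q = true)

def rsat (r : Int × Int → Int × Int → Bool) (s : Int × Int) : Finset (Int × Int) :=
  (rcl r)^[25] {s}

def ovr (V : Int × Int → Int) (T : Finset (Int × Int)) : Int × Int → Int :=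
  fun p => if p ∈ T then 1 else V p

theorem mem5 (i : Int) : i ∈ ([0, 1, 2, 3, 4] : List Int) ↔ 0 ≤ i ∧ i < 5 := by
  simp; omega

theorem mem_pvCells (p : Int × Int) : p ∈ pvCells ↔ pvInb p = true := by
  rcases p with ⟨i, j⟩
  simp only [pvCells, List.mem_flatMap, List.mem_map, mem5, pvInb, decide_eq_true_eq]
  constructor
  · rintro ⟨a, ha, b, hb, heq⟩
    rw [Prod.mk.injEq] at heq
    obtain ⟨h1, h2⟩ := heq
    subst h1; subst h2
    exact ⟨ha.1, ha.2, hb.1, hb.2⟩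
  · rintro ⟨h1, h2, h3, h4⟩
    exact ⟨i, ⟨h1, h2⟩, j, ⟨h3, h4⟩, rfl⟩

theorem mem_cellsF (p : Int × Int) : p ∈ cellsF ↔ pvInb p = true := by
  rw [cellsF, List.mem_toFinset]; exact mem_pvCells p

theorem card_cellsF : cellsF.card = 25 := by decide

theorem nodup_pvCells : pvCells.Nodup := by decide

theorem adjB_elim {g : Int × Int → Int} {p q : Int × Int} (h : adjB g p q = true) :
    (∃ d ∈ pvDirs, q = (p.1 + d.1, p.2 + d.2)) ∧ pvInb p = true ∧ pvInb q = true ∧ g p = g q := by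
  simp only [adjB, Bool.and_eq_true, List.any_eq_true, decide_eq_true_eq, beq_iff_eq] at h
  obtain ⟨⟨⟨h1, h2⟩, h3⟩, h4⟩ := h
  exact ⟨h1, h2, h3, h4⟩

theorem adjB_intro {g : Int × Int → Int} {p q : Int × Int} (d : Int × Int) (hd : d ∈ pvDirs)
    (hq : q = (p.1 + d.1, p.2 + d.2)) (hp : pvInb p = true) (hqb : pvInb q = true)
    (hg : g p = g q) : adjB g p q = true := by
  simp only [adjB, Bool.and_eq_true, List.any_eq_true, decide_eq_true_eq, beq_iff_eq]
  exact ⟨⟨⟨⟨d, hd, hq⟩, hp⟩, hqb⟩, hg⟩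

theorem adjB_symm {g : Int × Int → Int} {p q : Int × Int} (h : adjB g p q = true) :
    adjB g q p = true := by
  obtain ⟨⟨d, hd, hq⟩, hp, hqb, hg⟩ := adjB_elim h
  have hd' : d = (-1, 0) ∨ d = (0, 1) ∨ d = (1, 0) ∨ d = (0, -1) := by
    simpa [pvDirs] using hd
  rcases hd' with h' | h' | h' | h' <;> subst h' <;> subst hq
  · exact adjB_intro (1, 0) (by simp [pvDirs]) (by ext <;> simp) hqb hp hg.symm
  · exact adjB_intro (0, -1) (by simp [pvDirs]) (by ext <;> simp) hqb hp hg.symm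
  · exact adjB_intro (-1, 0) (by simp [pvDirs]) (by ext <;> simp) hqb hp hg.symm
  · exact adjB_intro (0, 1) (by simp [pvDirs]) (by ext <;> simp) hqb hp hg.symm

theorem mem_rcl {r : Int × Int → Int × Int → Bool} {S : Finset (Int × Int)} {q : Int × Int} :
    q ∈ rcl r S ↔ q ∈ S ∨ (q ∈ cellsF ∧ ∃ p ∈ S, r p q = true) := by
  simp [rcl, Finset.mem_filter]

theorem subset_rcl (r : Int × Int → Int × Int → Bool) (S : Finset (Int × Int)) : S ⊆ rcl r S :=
  Finset.subset_union_left

theorem rcl_mono {r : Int × Int → Int × Int → Bool} {S T : Finset (Int × Int)} (h : S ⊆ T) :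
    rcl r S ⊆ rcl r T := by
  intro x hx
  rw [mem_rcl] at hx ⊢
  rcases hx with hx | ⟨hc, p, hp, hr⟩
  · exact Or.inl (h hx)
  · exact Or.inr ⟨hc, p, h hp, hr⟩

theorem subset_iterate (r : Int × Int → Int × Int → Bool) :
    ∀ (n : Nat) (S : Finset (Int × Int)), S ⊆ (rcl r)^[n] S := by
  intro n
  induction n with
  | zero => intro S; simp
  | succ n ih =>
    intro S
    rw [Function.iterate_succ_apply]
    exact (subset_rcl r S).trans (ih (rcl r S))

theorem iterate_subset_iterate (r : Int × Int → Int × Int → Bool) {S T : Finset (Int × Int)}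
    (h : S ⊆ T) : ∀ n, (rcl r)^[n] S ⊆ (rcl r)^[n] T := by
  intro n
  induction n with
  | zero => simpa
  | succ n ih =>
    rw [Function.iterate_succ_apply', Function.iterate_succ_apply']
    exact rcl_mono ih

theorem mem_rsat_self (r : Int × Int → Int × Int → Bool) (s : Int × Int) : s ∈ rsat r s :=
  subset_iterate r 25 {s} (Finset.mem_singleton_self s)

theorem rsat_subset_cellsF {r : Int × Int → Int × Int → Bool} {s : Int × Int}
    (hs : s ∈ cellsF) : rsat r s ⊆ cellsF := by
  have : ∀ n, (rcl r)^[n] {s} ⊆ cellsF := by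
    intro n
    induction n with
    | zero => simpa using Finset.singleton_subset_iff.mpr hs
    | succ n ih =>
      rw [Function.iterate_succ_apply']
      intro x hx
      rw [mem_rcl] at hx
      rcases hx with hx | ⟨hc, _⟩
      · exact ih hx
      · exact hc
  exact this 25

theorem rcl_rsat {r : Int × Int → Int × Int → Bool} {s : Int × Int} (hs : s ∈ cellsF) :
    rcl r (rsat r s) = rsat r s := by
  -- pigeonhole: the 25-step monotone chain inside the 25-element board reaches a fixed point
  by_contra hne
  have hsub : ∀ n, (rcl r)^[n] {s} ⊆ (rcl r)^[n + 1] {s} := by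
    intro n
    rw [Function.iterate_succ_apply]
    exact iterate_subset_iterate r (subset_rcl r {s}) n
  have hfix : ∀ k, k ≤ 25 → rcl r ((rcl r)^[k] {s}) = (rcl r)^[k] {s} →
      rcl r (rsat r s) = rsat r s := by
    intro k hk25 hk
    have h1 : (rcl r)^[25] {s} = (rcl r)^[k] {s} := by
      obtain ⟨m, hm⟩ := Nat.exists_eq_add_of_le hk25
      rw [hm, Nat.add_comm, Function.iterate_add_apply]
      exact Function.iterate_fixed hk m
    rw [rsat, h1, hk]
  have hstrict : ∀ k, k ≤ 25 → k + 1 ≤ ((rcl r)^[k] {s}).card := by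
    intro k
    induction k with
    | zero => intro _; simp
    | succ k ih =>
      intro hk
      have h1 : (rcl r)^[k] {s} ⊂ (rcl r)^[k + 1] {s} := by
        refine ⟨hsub k, fun hback => ?_⟩
        have heq : (rcl r)^[k + 1] {s} = (rcl r)^[k] {s} :=
          Finset.Subset.antisymm hback (hsub k)
        rw [Function.iterate_succ_apply'] at heq
        exact hne (hfix k (by omega) heq)
      have := Finset.card_lt_card h1
      have := ih (by omega)
      omega
  have h25 : (rcl r)^[25] {s} ⊆ cellsF := rsat_subset_cellsF hs
  have hcard := Finset.card_le_card h25
  rw [card_cellsF] at hcard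
  have := hstrict 25 (le_refl 25)
  omega

theorem rsat_closed {r : Int × Int → Int × Int → Bool} {s : Int × Int} (hs : s ∈ cellsF)
    {p q : Int × Int} (hp : p ∈ rsat r s) (hr : r p q = true) (hq : q ∈ cellsF) :
    q ∈ rsat r s := by
  rw [← rcl_rsat hs, mem_rcl]
  exact Or.inr ⟨hq, p, hp, hr⟩

theorem rsat_min {r : Int × Int → Int × Int → Bool} {s : Int × Int} {T : Finset (Int × Int)}
    (hsT : s ∈ T) (hcl : ∀ p ∈ T, ∀ q, r p q = true → q ∈ T) : rsat r s ⊆ T := by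
  have : ∀ n, (rcl r)^[n] {s} ⊆ T := by
    intro n
    induction n with
    | zero => simpa using Finset.singleton_subset_iff.mpr hsT
    | succ n ih =>
      rw [Function.iterate_succ_apply']
      intro x hx
      rw [mem_rcl] at hx
      rcases hx with hx | ⟨_, p, hp, hr⟩
      · exact ih hx
      · exact hcl p (ih hp) x hr
  exact this 25

theorem rsat_reach {r : Int × Int → Int × Int → Bool} {s : Int × Int} (hs : s ∈ cellsF)
    (hr : ∀ p q, r p q = true → q ∈ cellsF) (x : Int × Int) :
    x ∈ rsat r s ↔ Relation.ReflTransGen (fun a b => r a b = true) s x := by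
  constructor
  · have : ∀ n y, y ∈ (rcl r)^[n] {s} → Relation.ReflTransGen (fun a b => r a b = true) s y := by
      intro n
      induction n with
      | zero => intro y hy; simp at hy; subst hy; exact Relation.ReflTransGen.refl
      | succ n ih =>
        intro y hy
        rw [Function.iterate_succ_apply', mem_rcl] at hy
        rcases hy with hy | ⟨_, p, hp, hrp⟩
        · exact ih y hy
        · exact Relation.ReflTransGen.tail (ih p hp) hrp
    exact this 25 x
  · intro h
    induction h with
    | refl => exact mem_rsat_self r s
    | tail _ hpq ih => exact rsat_closed hs ih hpq (hr _ _ hpq)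

theorem adjB_target_cellsF (g : Int × Int → Int) : ∀ p q, adjB g p q = true → q ∈ cellsF := by
  intro p q h
  exact (mem_cellsF q).mpr (adjB_elim h).2.2.1

theorem rsat_class_eq {g : Int × Int → Int} {s q : Int × Int} (hs : s ∈ cellsF)
    (hq : q ∈ rsat (adjB g) s) : rsat (adjB g) q = rsat (adjB g) s := by
  have hqc : q ∈ cellsF := rsat_subset_cellsF hs hq
  have hreach := (rsat_reach hs (adjB_target_cellsF g) q).mp hq
  have hback : Relation.ReflTransGen (fun a b => adjB g a b = true) q s :=
    (Relation.ReflTransGen.symmetric (fun a b h => adjB_symm h)) hreach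
  ext x
  rw [rsat_reach hs (adjB_target_cellsF g) x, rsat_reach hqc (adjB_target_cellsF g) x]
  constructor
  · intro h; exact hreach.trans h
  · intro h; exact hback.trans h


-- ===== BFS loop correctness =====

-- invariant of one bfs call: V = visited before the call, s = start, T = explored so far
def BInv (g V : Int × Int → Int) (s : Int × Int) (st : PvBfsSt) (T : Finset (Int × Int)) : Prop :=
  st.sset = T ∧ st.cnt = (T.card : Int) ∧ st.vis = ovr V T ∧
  (∀ p ∈ st.q, p ∈ T) ∧ st.q.Nodup ∧ T ⊆ rsat (rV g V) s ∧ s ∈ T ∧ (∀ p ∈ T, pvInb p = true)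

-- every explored cell not excluded (still queued) is fully expanded
def FrOn (g V : Int × Int → Int) (excl : List (Int × Int)) (T : Finset (Int × Int)) : Prop :=
  ∀ p ∈ T, p ∉ excl → ∀ q, rV g V p q = true → q ∈ T

theorem rV_target_cellsF (g V : Int × Int → Int) :
    ∀ p q, rV g V p q = true → q ∈ cellsF := by
  intro p q h
  rw [rV, Bool.and_eq_true] at h
  exact adjB_target_cellsF g p q h.1

theorem stepDir_spec (g V : Int × Int → Int) (s c : Int × Int) (hs : s ∈ cellsF)
    (d : Int × Int) (hd : d ∈ pvDirs) (st : PvBfsSt) (T : Finset (Int × Int))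
    (hI : BInv g V s st T) (hc : c ∈ T) :
    ∃ T', BInv g V s (pvStepDir g c st d) T' ∧ T ⊆ T' ∧
      st.q <+: (pvStepDir g c st d).q ∧
      (∀ p ∈ T', p ∉ T → p ∈ (pvStepDir g c st d).q) ∧
      (pvStepDir g c st d).q.length + T.card = st.q.length + T'.card ∧
      (rV g V c (c.1 + d.1, c.2 + d.2) = true → (c.1 + d.1, c.2 + d.2) ∈ T') := by
  obtain ⟨hsset, hcnt, hvis, hq, hnd, hsat, hsT, hinb⟩ := hI
  rw [pvStepDir]
  set n : Int × Int := (c.1 + d.1, c.2 + d.2) with hn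
  by_cases hcond : pvInb n = true ∧ st.vis n = 0 ∧ g c = g n
  · obtain ⟨hnb, hvn, hgn⟩ := hcond
    have hnT : n ∉ T ∧ V n = 0 := by
      rw [hvis] at hvn
      simp only [ovr] at hvn
      by_cases h : n ∈ T
      · rw [if_pos h] at hvn; norm_num at hvn
      · rw [if_neg h] at hvn; exact ⟨h, hvn⟩
    have hrV : rV g V c n = true := by
      rw [rV, Bool.and_eq_true]
      refine ⟨adjB_intro d hd rfl (hinb c hc) hnb hgn, by simpa using hnT.2⟩
    have hnsat : n ∈ rsat (rV g V) s :=
      rsat_closed hs (hsat hc) hrV ((mem_cellsF n).mpr hnb)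
    rw [if_pos ⟨hnb, hvn, hgn⟩]
    refine ⟨insert n T, ⟨by simp [hsset], ?_, ?_, ?_, ?_, ?_, ?_, ?_⟩, Finset.subset_insert n T,
      List.prefix_append st.q [n], ?_, ?_, fun _ => Finset.mem_insert_self n T⟩
    · simp [hcnt, Finset.card_insert_of_notMem hnT.1]
    · funext x
      simp only [pvUpd, ovr, Finset.mem_insert]
      by_cases hx : x = n
      · simp [hx]
      · by_cases hxT : x ∈ T <;> simp [hx, hxT, hvis, ovr]
    · intro p hp
      rcases List.mem_append.mp hp with hp | hp
      · exact Finset.mem_insert_of_mem (hq p hp)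
      · rw [List.mem_singleton] at hp; subst hp; exact Finset.mem_insert_self n T
    · rw [List.nodup_append]
      refine ⟨hnd, List.nodup_singleton n, fun a ha b hb => ?_⟩
      rw [List.mem_singleton] at hb
      subst hb
      intro heq
      subst heq
      exact hnT.1 (hq _ ha)
    · intro x hx
      rcases Finset.mem_insert.mp hx with hx | hx
      · subst hx; exact hnsat
      · exact hsat hx
    · exact Finset.mem_insert_of_mem hsT
    · intro p hp
      rcases Finset.mem_insert.mp hp with hp | hp
      · subst hp; exact hnb
      · exact hinb p hp
    · intro p hp hpT
      rcases Finset.mem_insert.mp hp with hp | hp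
      · subst hp; simp
      · exact absurd hp hpT
    · simp [Finset.card_insert_of_notMem hnT.1]
      omega
  · rw [if_neg hcond]
    refine ⟨T, ⟨hsset, hcnt, hvis, hq, hnd, hsat, hsT, hinb⟩, le_refl T, List.prefix_refl st.q,
      fun p hp hpT => absurd hp hpT, by omega, ?_⟩
    intro hrV
    rw [rV, Bool.and_eq_true, decide_eq_true_eq] at hrV
    obtain ⟨hadj, hVn⟩ := hrV
    obtain ⟨_, _, hnb, hgn⟩ := adjB_elim hadj
    by_cases hmem : n ∈ T
    · exact hmem
    · exfalso
      apply hcond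
      refine ⟨hnb, ?_, hgn⟩
      rw [hvis]
      simp only [ovr]
      rw [if_neg hmem]
      exact hVn

theorem expand_spec (g V : Int × Int → Int) (s c : Int × Int) (hs : s ∈ cellsF) :
    ∀ (ds : List (Int × Int)), (∀ d ∈ ds, d ∈ pvDirs) →
    ∀ (st : PvBfsSt) (T : Finset (Int × Int)), BInv g V s st T → c ∈ T →
    ∃ T', BInv g V s (ds.foldl (pvStepDir g c) st) T' ∧ T ⊆ T' ∧
      st.q <+: (ds.foldl (pvStepDir g c) st).q ∧
      (∀ p ∈ T', p ∉ T → p ∈ (ds.foldl (pvStepDir g c) st).q) ∧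
      (ds.foldl (pvStepDir g c) st).q.length + T.card = st.q.length + T'.card ∧
      (∀ d ∈ ds, rV g V c (c.1 + d.1, c.2 + d.2) = true → (c.1 + d.1, c.2 + d.2) ∈ T') := by
  intro ds
  induction ds with
  | nil =>
    intro _ st T hI hc
    exact ⟨T, hI, le_refl T, List.prefix_refl st.q, fun p hp hpT => absurd hp hpT, by simp,
      by intro d hd; simp at hd⟩
  | cons d ds ih =>
    intro hds st T hI hc
    simp only [List.foldl_cons]
    obtain ⟨T1, hI1, hsub1, hpre1, hnew1, hlen1, hcov1⟩ :=
      stepDir_spec g V s c hs d (hds d (List.mem_cons_self)) st T hI hc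
    obtain ⟨T', hI', hsub', hpre', hnew', hlen', hcov'⟩ :=
      ih (fun d' hd' => hds d' (List.mem_cons_of_mem d hd')) (pvStepDir g c st d) T1 hI1
        (hsub1 hc)
    refine ⟨T', hI', hsub1.trans hsub', hpre1.trans hpre', ?_, by omega, ?_⟩
    · intro p hp hpT
      by_cases hp1 : p ∈ T1
      · exact hpre'.subset (hnew1 p hp1 hpT)
      · exact hnew' p hp hp1
    · intro d' hd' hr
      rcases List.mem_cons.mp hd' with hd' | hd'
      · subst hd'; exact hsub' (hcov1 hr)
      · exact hcov' d' hd' hr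

theorem loop_spec (g V : Int × Int → Int) (s : Int × Int) (hs : s ∈ cellsF) :
    ∀ (fuel : Nat) (st : PvBfsSt) (T : Finset (Int × Int)),
      BInv g V s st T → FrOn g V st.q T →
      st.q.length + 2 * (25 - T.card) ≤ fuel →
      ∃ T', BInv g V s (pvBfsLoop g fuel st) T' ∧ (pvBfsLoop g fuel st).q = [] ∧
        FrOn g V [] T' ∧ T ⊆ T' := by
  intro fuel
  induction fuel with
  | zero =>
    rintro ⟨q, vis, sset, cnt⟩ T hI hFr hm
    have hq : q = [] := by
      dsimp only at hm
      have : q.length = 0 := by omega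
      exact List.eq_nil_of_length_eq_zero this
    subst hq
    exact ⟨T, hI, rfl, by intro p hp _ q' hr; exact hFr p hp (by simp) q' hr, le_refl T⟩
  | succ fuel ih =>
    rintro ⟨q, vis, sset, cnt⟩ T hI hFr hm
    cases q with
    | nil =>
      exact ⟨T, hI, rfl, by intro p hp _ q' hr; exact hFr p hp (by simp) q' hr, le_refl T⟩
    | cons c rest =>
      obtain ⟨hsset, hcnt, hvis, hq, hnd, hsat, hsT, hinb⟩ := hI
      have hcT : c ∈ T := hq c List.mem_cons_self
      have hI1 : BInv g V s ⟨rest, vis, sset, cnt⟩ T := by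
        refine ⟨hsset, hcnt, hvis, ?_, (List.nodup_cons.mp hnd).2, hsat, hsT, hinb⟩
        intro p hp; exact hq p (List.mem_cons_of_mem c hp)
      obtain ⟨T1, hI1', hsub1, hpre1, hnew1, hlen1, hcov1⟩ :=
        expand_spec g V s c hs pvDirs (fun _ hd => hd) ⟨rest, vis, sset, cnt⟩ T hI1 hcT
      have hT1cells : T1 ⊆ cellsF := by
        intro p hp; exact (mem_cellsF p).mpr (hI1'.2.2.2.2.2.2.2 p hp)
      have hT1card : T1.card ≤ 25 := by
        have := Finset.card_le_card hT1cells
        rwa [card_cellsF] at this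
      have hFr1 : FrOn g V (pvDirs.foldl (pvStepDir g c) ⟨rest, vis, sset, cnt⟩).q T1 := by
        intro p hp hpq q' hr
        by_cases hpT : p ∈ T
        · by_cases hpc : p = c
          · subst hpc
            obtain ⟨⟨d, hd, hq'⟩, _, _, _⟩ := adjB_elim (by
              rw [rV, Bool.and_eq_true] at hr; exact hr.1)
            subst hq'
            exact hcov1 d hd hr
          · have hprest : p ∉ rest := fun hmem => hpq (hpre1.subset hmem)
            have hpcr : p ∉ (c :: rest) := by
              simp [hpc, hprest]
            exact hsub1 (hFr p hpT hpcr q' hr)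
        · exact absurd (hnew1 p hp hpT) hpq
      have hm1 : (pvDirs.foldl (pvStepDir g c) ⟨rest, vis, sset, cnt⟩).q.length +
          2 * (25 - T1.card) ≤ fuel := by
        have hTsub := Finset.card_le_card hsub1
        simp only [List.length_cons] at hm
        dsimp only at hm hlen1 ⊢
        omega
      obtain ⟨T', hI', hq', hFr', hsub'⟩ :=
        ih (pvDirs.foldl (pvStepDir g c) ⟨rest, vis, sset, cnt⟩) T1 hI1' hFr1 hm1
      exact ⟨T', hI', hq', hFr', hsub1.trans hsub'⟩

theorem pvBfs_spec (g V : Int × Int → Int) (s : Int × Int) (clr : Int)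
    (hsb : pvInb s = true) :
    (pvBfs g V s clr).2.1 = ovr V (rsat (rV g V) s) ∧
    (pvBfs g V s clr).2.2 =
      (if 3 ≤ ((rsat (rV g V) s).card : Int) then ((rsat (rV g V) s).card : Int) else 0) ∧
    (∀ p, p ∉ rsat (rV g V) s → (pvBfs g V s clr).1 p = g p) := by
  have hs : s ∈ cellsF := (mem_cellsF s).mpr hsb
  have hI0 : BInv g V s (PvBfsSt.mk [s] (pvUpd V s 1) {s} 1) {s} := by
    refine ⟨rfl, by simp, ?_, by simp, List.nodup_singleton s, ?_, Finset.mem_singleton_self s, ?_⟩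
    · funext x
      simp only [pvUpd, ovr, Finset.mem_singleton]
    · intro x hx
      rw [Finset.mem_singleton] at hx
      rw [hx]
      exact mem_rsat_self _ s
    · intro p hp
      rw [Finset.mem_singleton] at hp
      rw [hp]
      exact hsb
  have hFr0 : FrOn g V [s] {s} := by
    intro p hp hpq
    rw [Finset.mem_singleton] at hp
    rw [hp] at hpq
    simp at hpq
  obtain ⟨T', hI', hq', hFr', _⟩ :=
    loop_spec g V s hs 50 (PvBfsSt.mk [s] (pvUpd V s 1) {s} 1) {s} hI0 hFr0 (by simp)
  obtain ⟨hsset, hcnt, hvis, _, _, hsat, hsT, _⟩ := hI'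
  have hTD : T' = rsat (rV g V) s := by
    refine Finset.Subset.antisymm hsat (rsat_min hsT ?_)
    intro p hp q hr
    exact hFr' p hp (by simp) q hr
  subst hTD
  simp only [pvBfs]
  set st := pvBfsLoop g 50 (PvBfsSt.mk [s] (pvUpd V s 1) {s} 1) with hst
  refine ⟨?_, ?_, ?_⟩
  · by_cases h : (3 : Int) ≤ st.cnt
    · rw [if_pos h]
      by_cases hclr : clr = 1
      · rw [if_pos hclr]; exact hvis
      · rw [if_neg hclr]; exact hvis
    · rw [if_neg h]; exact hvis
  · by_cases h : (3 : Int) ≤ st.cnt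
    · rw [if_pos h]
      rw [hcnt] at h
      rw [if_pos h]
      exact hcnt
    · rw [if_neg h]
      rw [hcnt] at h
      rw [if_neg h]
  · intro p hp
    by_cases h : (3 : Int) ≤ st.cnt
    · rw [if_pos h]
      by_cases hclr : clr = 1
      · rw [if_pos hclr]
        show (if p ∈ st.sset then 0 else g p) = g p
        rw [hsset, if_neg hp]
      · rw [if_neg hclr]
    · rw [if_neg h]


-- ===== transfer: one bfs call on the partially-zeroed grid explores the original component =====

theorem class_not_mem {g0 : Int × Int → Int} {U : Finset (Int × Int)} {s : Int × Int}
    (hcls : ∀ p ∈ U, rsat (adjB g0) p ⊆ U) (hsU : s ∉ U) (hsc : s ∈ cellsF)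
    {p : Int × Int} (hp : p ∈ rsat (adjB g0) s) : p ∉ U := by
  intro hpU
  apply hsU
  apply hcls p hpU
  rw [rsat_class_eq hsc hp]
  exact mem_rsat_self _ s

theorem adjB_congr {g g0 : Int × Int → Int} {p q : Int × Int}
    (hp : g p = g0 p) (hq : g q = g0 q) : adjB g p q = adjB g0 p q := by
  simp only [adjB, hp, hq]

theorem transfer (g0 g' : Int × Int → Int) (U : Finset (Int × Int)) (s : Int × Int)
    (hcls : ∀ p ∈ U, rsat (adjB g0) p ⊆ U)
    (hg : ∀ p, p ∉ U → g' p = g0 p) (hsU : s ∉ U) (hsc : s ∈ cellsF) :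
    rsat (rV g' (fun p => if p ∈ U then 1 else 0)) s = rsat (adjB g0) s := by
  set V : Int × Int → Int := fun p => if p ∈ U then 1 else 0 with hV
  have hVmem : ∀ p, V p = 0 ↔ p ∉ U := by
    intro p; by_cases h : p ∈ U <;> simp [hV, h]
  ext x
  rw [rsat_reach hsc (rV_target_cellsF g' V) x, rsat_reach hsc (adjB_target_cellsF g0) x]
  constructor
  · intro h
    induction h with
    | refl => exact Relation.ReflTransGen.refl
    | @tail b c hst hr ih =>
      have hb : b ∈ rsat (adjB g0) s := (rsat_reach hsc (adjB_target_cellsF g0) b).mpr ih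
      have hbU : b ∉ U := class_not_mem hcls hsU hsc hb
      rw [rV, Bool.and_eq_true, decide_eq_true_eq] at hr
      have hcU : c ∉ U := (hVmem c).mp hr.2
      have hadj : adjB g0 b c = true := by
        rw [← adjB_congr (hg b hbU) (hg c hcU)]; exact hr.1
      exact Relation.ReflTransGen.tail ih hadj
  · intro h
    induction h with
    | refl => exact Relation.ReflTransGen.refl
    | @tail b c hst hadj ih =>
      have hb : b ∈ rsat (adjB g0) s := (rsat_reach hsc (adjB_target_cellsF g0) b).mpr hst
      have hc : c ∈ rsat (adjB g0) s :=
        rsat_closed hsc hb hadj (adjB_target_cellsF g0 b c hadj)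
      have hbU : b ∉ U := class_not_mem hcls hsU hsc hb
      have hcU : c ∉ U := class_not_mem hcls hsU hsc hc
      have hr : rV g' V b c = true := by
        rw [rV, Bool.and_eq_true, decide_eq_true_eq]
        exact ⟨by rw [adjB_congr (hg b hbU) (hg c hcU)]; exact hadj, (hVmem c).mpr hcU⟩
      exact Relation.ReflTransGen.tail ih hr

-- ===== the outer double scan of A =====

def OInv (g0 : Int × Int → Int) (acc : (Int × Int → Int) × (Int × Int → Int) × Int)
    (U : Finset (Int × Int)) : Prop :=
  acc.2.1 = (fun p => if p ∈ U then (1 : Int) else 0) ∧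
  (∀ p ∈ U, rsat (adjB g0) p ⊆ U) ∧
  (∀ p, p ∉ U → acc.1 p = g0 p) ∧
  acc.2.2 = ((U.filter (fun c => 3 ≤ (rsat (adjB g0) c).card)).card : Int) ∧
  U ⊆ cellsF

theorem card_step (g0 : Int × Int → Int) {U D : Finset (Int × Int)} (hdisj : Disjoint U D)
    (hD : ∀ c' ∈ D, rsat (adjB g0) c' = D) :
    ((U ∪ D).filter (fun c => 3 ≤ (rsat (adjB g0) c).card)).card =
      (U.filter (fun c => 3 ≤ (rsat (adjB g0) c).card)).card +
        (if 3 ≤ D.card then D.card else 0) := by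
  rw [Finset.filter_union,
    Finset.card_union_of_disjoint (Finset.disjoint_filter_filter hdisj)]
  congr 1
  by_cases h3 : 3 ≤ D.card
  · rw [if_pos h3, Finset.filter_true_of_mem]
    intro x hx
    rw [hD x hx]
    exact h3
  · rw [if_neg h3, Finset.filter_false_of_mem, Finset.card_empty]
    intro x hx
    rw [hD x hx]
    exact h3

theorem int_if_cast (k : Nat) :
    (if (3 : Int) ≤ (k : Int) then (k : Int) else 0) = ((if 3 ≤ k then k else 0 : Nat) : Int) := by
  by_cases h : 3 ≤ k
  · rw [if_pos (by exact_mod_cast h), if_pos h]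
  · rw [if_neg (by exact_mod_cast h), if_neg h]
    simp

theorem outer_spec (g0 : Int × Int → Int) (clr : Int) :
    ∀ (cs : List (Int × Int)), (∀ c ∈ cs, pvInb c = true) →
    ∀ (acc : (Int × Int → Int) × (Int × Int → Int) × Int) (U : Finset (Int × Int)),
      OInv g0 acc U →
      ∃ U', OInv g0 (cs.foldl (pvOuterStep clr) acc) U' ∧ U ⊆ U' ∧ ∀ c ∈ cs, c ∈ U' := by
  intro cs
  induction cs with
  | nil =>
    intro _ acc U hI
    exact ⟨U, hI, le_refl U, by simp⟩
  | cons c cs ih =>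
    intro hcs acc U hI
    obtain ⟨hvis, hcls, hg, hcnt, hUc⟩ := hI
    have hcb : pvInb c = true := hcs c List.mem_cons_self
    have hcc : c ∈ cellsF := (mem_cellsF c).mpr hcb
    simp only [List.foldl_cons]
    by_cases hcU : c ∈ U
    · have hstep : pvOuterStep clr acc c = acc := by
        rw [pvOuterStep, hvis]
        rw [if_neg (by simp [hcU])]
      rw [hstep]
      obtain ⟨U', hI', hsub, hall⟩ := ih (fun c' hc' => hcs c' (List.mem_cons_of_mem c hc'))
        acc U ⟨hvis, hcls, hg, hcnt, hUc⟩
      refine ⟨U', hI', hsub, ?_⟩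
      intro c' hc'
      rcases List.mem_cons.mp hc' with hc' | hc'
      · rw [hc']; exact hsub hcU
      · exact hall c' hc'
    · have hv0 : acc.2.1 c = 0 := by rw [hvis]; simp [hcU]
      have hstep : pvOuterStep clr acc c =
          ((pvBfs acc.1 acc.2.1 c clr).1, (pvBfs acc.1 acc.2.1 c clr).2.1,
            acc.2.2 + (pvBfs acc.1 acc.2.1 c clr).2.2) := by
        rw [pvOuterStep, if_pos hv0]
      obtain ⟨hbv, hbc, hbg⟩ := pvBfs_spec acc.1 acc.2.1 c clr hcb
      have htr : rsat (rV acc.1 acc.2.1) c = rsat (adjB g0) c := by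
        rw [hvis]
        exact transfer g0 acc.1 U c hcls hg hcU hcc
      rw [htr] at hbv hbc hbg
      have hDsub : rsat (adjB g0) c ⊆ cellsF := rsat_subset_cellsF hcc
      have hDdisj : Disjoint U (rsat (adjB g0) c) := by
        rw [Finset.disjoint_left]
        intro p hpU hpD
        exact (class_not_mem hcls hcU hcc hpD) hpU
      have hclass : ∀ c' ∈ rsat (adjB g0) c, rsat (adjB g0) c' = rsat (adjB g0) c :=
        fun c' hc' => rsat_class_eq hcc hc'
      have hI' : OInv g0 ((pvBfs acc.1 acc.2.1 c clr).1, (pvBfs acc.1 acc.2.1 c clr).2.1,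
          acc.2.2 + (pvBfs acc.1 acc.2.1 c clr).2.2) (U ∪ rsat (adjB g0) c) := by
        refine ⟨?_, ?_, ?_, ?_, Finset.union_subset hUc hDsub⟩
        · rw [hbv, hvis]
          funext p
          simp only [ovr, Finset.mem_union]
          by_cases hpD : p ∈ rsat (adjB g0) c <;> by_cases hpU : p ∈ U <;>
            simp [hpD, hpU]
        · intro p hp
          rcases Finset.mem_union.mp hp with hp | hp
          · exact (hcls p hp).trans Finset.subset_union_left
          · rw [hclass p hp]
            exact Finset.subset_union_right
        · intro p hp
          rw [Finset.mem_union] at hp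
          rw [hbg p (fun h => hp (Or.inr h))]
          exact hg p (fun h => hp (Or.inl h))
        · rw [hbc, hcnt, card_step g0 hDdisj hclass, int_if_cast]
          push_cast
          ring
      obtain ⟨U', hI'', hsub, hall⟩ := ih (fun c' hc' => hcs c' (List.mem_cons_of_mem c hc'))
        _ (U ∪ rsat (adjB g0) c) hI'
      rw [hstep]
      refine ⟨U', hI'', Finset.subset_union_left.trans hsub, ?_⟩
      intro c' hc'
      rcases List.mem_cons.mp hc' with hc' | hc'
      · rw [hc']
        exact hsub (Finset.mem_union_right U (mem_rsat_self _ c))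
      · exact hall c' hc'

-- ===== B's saturation equals the abstract closure =====

theorem foldl_iterate {α : Type} (f : α → α) :
    ∀ (n : Nat) (a : α), (List.range n).foldl (fun S _ => f S) a = f^[n] a := by
  intro n
  induction n with
  | zero => intro a; rfl
  | succ n ih =>
    intro a
    rw [List.range_succ, List.foldl_append, ih, Function.iterate_succ_apply']
    rfl

theorem pvStepB_eq (g : Int × Int → Int) {S : Finset (Int × Int)}
    (hS : ∀ p ∈ S, pvInb p = true) : pvStepB g S = rcl (adjB g) S := by
  ext x
  rw [mem_rcl]
  simp only [pvStepB, Finset.mem_union, Finset.mem_biUnion, List.mem_toFinset, List.mem_filter,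
    List.mem_map, Bool.and_eq_true, beq_iff_eq]
  constructor
  · rintro (hx | ⟨p, hp, ⟨d, hd, hxd⟩, hxb, hgx⟩)
    · exact Or.inl hx
    · exact Or.inr ⟨(mem_cellsF x).mpr hxb, p, hp,
        adjB_intro d hd hxd.symm (hS p hp) hxb hgx.symm⟩
  · rintro (hx | ⟨hxc, p, hp, hadj⟩)
    · exact Or.inl hx
    · obtain ⟨⟨d, hd, hxd⟩, _, hxb, hgeq⟩ := adjB_elim hadj
      exact Or.inr ⟨p, hp, ⟨d, hd, hxd.symm⟩, hxb, hgeq.symm⟩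

theorem pvComp_eq (g : Int × Int → Int) (s : Int × Int) (hsb : pvInb s = true) :
    pvComp g s = rsat (adjB g) s := by
  rw [pvComp, foldl_iterate, rsat]
  suffices h : ∀ n, (pvStepB g)^[n] {s} = (rcl (adjB g))^[n] {s} ∧
      ∀ p ∈ (rcl (adjB g))^[n] {s}, pvInb p = true from (h 25).1
  intro n
  induction n with
  | zero =>
    refine ⟨rfl, ?_⟩
    intro p hp
    simp only [Function.iterate_zero_apply, Finset.mem_singleton] at hp
    rw [hp]
    exact hsb
  | succ n ih =>
    obtain ⟨heq, hinb⟩ := ih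
    refine ⟨?_, ?_⟩
    · rw [Function.iterate_succ_apply', Function.iterate_succ_apply', heq, pvStepB_eq g hinb]
    · rw [Function.iterate_succ_apply']
      intro p hp
      rw [mem_rcl] at hp
      rcases hp with hp | ⟨hc, _⟩
      · exact hinb p hp
      · exact (mem_cellsF p).mp hc

-- ===== VERDICT (by name: the statement is the Claim_ definition above) =====
theorem count_clear_spec : Claim_equal_count_clear := by
  intro arr clr _ _
  unfold Spec_count_clear
  obtain ⟨U', hI', _, hall⟩ := outer_spec (pvGrid arr) clr pvCells
    (fun c hc => (mem_pvCells c).mp hc)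
    (pvGrid arr, fun _ => (0 : Int), (0 : Int)) ∅
    ⟨by funext p; simp, by simp, fun p _ => rfl, by simp, Finset.empty_subset _⟩
  obtain ⟨_, _, _, hcnt, hUsub⟩ := hI'
  have hU' : U' = cellsF := by
    refine Finset.Subset.antisymm hUsub ?_
    intro c hc
    exact hall c (by rwa [cellsF, List.mem_toFinset] at hc)
  rw [count_clear, count_clear_alt, hcnt, hU']
  have hfc : pvCells.filter (fun c => decide (3 ≤ (pvComp (pvGrid arr) c).card)) =
      pvCells.filter (fun c => decide (3 ≤ (rsat (adjB (pvGrid arr)) c).card)) := by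
    apply List.filter_congr
    intro c hc
    rw [pvComp_eq (pvGrid arr) c ((mem_pvCells c).mp hc)]
  rw [hfc]
  have hset : cellsF.filter (fun c => 3 ≤ (rsat (adjB (pvGrid arr)) c).card) =
      (pvCells.filter (fun c => decide (3 ≤ (rsat (adjB (pvGrid arr)) c).card))).toFinset := by
    ext x
    simp [cellsF, List.mem_toFinset, Finset.mem_filter]
  rw [hset, List.toFinset_card_of_nodup (nodup_pvCells.filter _)]
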